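-- pv_equiv track=rewrite | github.com/dtg01100/pure3270 | mcp-servers/terminal-debugger/server.py | _extract_field_content
-- ===== SOURCE A (Python) =====
-- def _extract_field_content(
--
--     buffer_str: str,
--     start_row: int,
--     start_col: int,
--     end_row: int,
--     end_col: int,
--     cols: int,
-- ) -> str:
--     """Extract content from a field range"""
--     content = []
--     for r in range(start_row, end_row + 1):
--         c_start = start_col if r == start_row else 0
--         c_end = end_col if r == end_row else cols - 1
--         for c in range(c_start, c_end + 1):
--             pos = r * cols + c
--             if pos < len(buffer_str):
--                 content.append(buffer_str[pos])
--     return "".join(content).strip()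
-- ===== SOURCE B (Python) =====
-- def _extract_field_content(
--     buffer_str: str,
--     start_row: int,
--     start_col: int,
--     end_row: int,
--     end_col: int,
--     cols: int,
-- ) -> str:
--     """Extract content from a field range (one slice per row instead of a per-character loop)."""
--     parts = []
--     for r in range(start_row, end_row + 1):
--         c_start = start_col if r == start_row else 0
--         c_end = end_col if r == end_row else cols - 1
--         if c_start <= c_end:
--             base = r * cols
--             parts.append(buffer_str[base + c_start : base + c_end + 1])
--     return "".join(parts).strip()
-- ===== Notes on version B (the rewrite author's own statement) =====
-- stated objective: simpler
-- what changed: The nested rows-by-columns per-character loop (append one char at a time with a bounds test on each position) is replaced by a single loop over rows that takes one clipped slice of the buffer per row and joins the slices.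
-- outside the precondition, e.g. on _extract_field_content('abcdef', -1, 0, -1, 1, 2): A returns 'ef', B returns ''
import Mathlib
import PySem

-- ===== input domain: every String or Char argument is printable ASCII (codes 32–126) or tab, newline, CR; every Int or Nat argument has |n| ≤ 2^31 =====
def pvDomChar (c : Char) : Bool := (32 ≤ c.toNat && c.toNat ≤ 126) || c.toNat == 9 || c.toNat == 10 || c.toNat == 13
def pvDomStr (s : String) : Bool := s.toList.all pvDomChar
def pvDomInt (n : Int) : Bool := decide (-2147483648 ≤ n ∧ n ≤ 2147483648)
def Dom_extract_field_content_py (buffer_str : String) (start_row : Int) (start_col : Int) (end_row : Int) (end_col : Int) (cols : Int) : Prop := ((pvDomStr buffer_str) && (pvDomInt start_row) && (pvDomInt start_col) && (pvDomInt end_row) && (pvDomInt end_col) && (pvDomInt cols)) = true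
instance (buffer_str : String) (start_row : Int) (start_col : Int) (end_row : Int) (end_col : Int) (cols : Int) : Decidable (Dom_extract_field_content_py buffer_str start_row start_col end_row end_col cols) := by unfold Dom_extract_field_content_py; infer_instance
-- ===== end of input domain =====

-- B replaces A's nested rows×columns per-character loop (bounds test + append per character)
-- by one clipped buffer slice per row, joined and stripped; objective: simpler.

-- ===== PORT A =====
def extract_field_content_py (buffer_str : String) (start_row : Int) (start_col : Int) (end_row : Int) (end_col : Int) (cols : Int) : String :=
  PySem.Str.strip (String.ofList
    ((PySem.List.pyRange start_row (end_row + 1) 1).foldl (fun content r =>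
      (PySem.List.pyRange (if r = start_row then start_col else 0)
          ((if r = end_row then end_col else cols - 1) + 1) 1).foldl (fun content c =>
        if r * cols + c < (PySem.Str.len buffer_str : Int) then
          match PySem.Str.pyGet? buffer_str (r * cols + c) with
          | some ch => content ++ [ch]
          | none => content      -- IndexError (negative pos below -len); outside Pre_
        else content) content) []))

-- ===== PORT B =====
def extract_field_content_py_alt (buffer_str : String) (start_row : Int) (start_col : Int) (end_row : Int) (end_col : Int) (cols : Int) : String :=
  PySem.Str.strip (PySem.Str.join ""
    ((PySem.List.pyRange start_row (end_row + 1) 1).foldl (fun parts r =>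
      if (if r = start_row then start_col else 0) ≤ (if r = end_row then end_col else cols - 1) then
        parts ++ [PySem.Str.slice buffer_str
          (some (r * cols + (if r = start_row then start_col else 0)))
          (some (r * cols + (if r = end_row then end_col else cols - 1) + 1))]
      else parts) []))

-- ===== PRECONDITION & SPEC =====
-- Pre_ restricts to the natural domain of the field extractor — nonnegative start_row, start_col
-- and cols (or an empty row range, on which nothing is read): outside it A indexes the buffer at
-- negative positions, raising IndexError or wrapping around to the end of the buffer, a
-- negative-index artefact that B's slicing does not reproduce.
def Pre_extract_field_content_py (buffer_str : String) (start_row : Int) (start_col : Int) (end_row : Int) (end_col : Int) (cols : Int) : Prop :=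
  end_row < start_row ∨ (0 ≤ start_row ∧ 0 ≤ start_col ∧ 0 ≤ cols)
instance (buffer_str : String) (start_row : Int) (start_col : Int) (end_row : Int) (end_col : Int) (cols : Int) : Decidable (Pre_extract_field_content_py buffer_str start_row start_col end_row end_col cols) := by unfold Pre_extract_field_content_py; infer_instance

def pvWitness_extract_field_content_py : String × Int × Int × Int × Int × Int := ("ab cd", 0, 0, 1, 1, 2)

def Spec_extract_field_content_py (buffer_str : String) (start_row : Int) (start_col : Int) (end_row : Int) (end_col : Int) (cols : Int) (out : String) : Prop := out = extract_field_content_py_alt buffer_str start_row start_col end_row end_col cols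
instance (buffer_str : String) (start_row : Int) (start_col : Int) (end_row : Int) (end_col : Int) (cols : Int) (out : String) : Decidable (Spec_extract_field_content_py buffer_str start_row start_col end_row end_col cols out) := by unfold Spec_extract_field_content_py; infer_instance

-- ===== CLAIM (what is proved, stated in full; the proofs are below) =====
def Claim_equal_extract_field_content_py : Prop := ∀ (buffer_str : String) (start_row : Int) (start_col : Int) (end_row : Int) (end_col : Int) (cols : Int), Dom_extract_field_content_py buffer_str start_row start_col end_row end_col cols → Pre_extract_field_content_py buffer_str start_row start_col end_row end_col cols → Spec_extract_field_content_py buffer_str start_row start_col end_row end_col cols (extract_field_content_py buffer_str start_row start_col end_row end_col cols)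

-- ===== LEMMAS AND PROOFS =====

-- ''.join on char-lists is flatten
lemma pv_join_nil_flatten (css : List (List Char)) : PySem.Chars.join [] css = css.flatten := by
  induction css with
  | nil => simp [PySem.Chars.join_nil]
  | cons c t ih =>
    cases t with
    | nil => simp [PySem.Chars.join_singleton]
    | cons d u => rw [PySem.Chars.join_cons_cons]; simp at ih ⊢; simp [ih]

lemma pv_flatten_flatMap (l : List Int) (g : Int → List (List Char)) :
    (l.flatMap g).flatten = l.flatMap (fun x => (g x).flatten) := by
  induction l with
  | nil => simp
  | cons h t ih => simp [ih]

-- reindex a fold over range(a,b) reading positions base+c as a fold over range(base+a, base+b)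
lemma pv_fold_shift (f : List Char → Int → List Char) (base a b : Int) (init : List Char) :
    (PySem.List.pyRange a b 1).foldl (fun acc c => f acc (base + c)) init
      = (PySem.List.pyRange (base + a) (base + b) 1).foldl f init := by
  rw [PySem.List.pyRange_one, PySem.List.pyRange_one, List.foldl_map, List.foldl_map]
  have h : (base + b - (base + a)).toNat = (b - a).toNat := by omega
  rw [h]
  simp only [← add_assoc]

-- A's inner per-character loop over positions lo..hi-1 (guarded by pos < len) collects the
-- clipped segment of the buffer
lemma pv_row_fold (s : List Char) (hi : Int) :
    ∀ (n : Nat) (lo : Int), n = (hi - lo).toNat → 0 ≤ lo → ∀ (acc : List Char),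
    (PySem.List.pyRange lo hi 1).foldl (fun acc2 p =>
        if p < (s.length : Int) then
          match PySem.List.pyGet? s p with
          | some ch => acc2 ++ [ch]
          | none => acc2
        else acc2) acc
      = acc ++ (s.drop lo.toNat).take (hi - lo).toNat := by
  intro n
  induction n with
  | zero =>
    intro lo hn hlo acc
    rw [PySem.List.pyRange_one_eq_nil (by omega), ← hn]
    simp
  | succ n ih =>
    intro lo hn hlo acc
    have hlt : lo < hi := by omega
    rw [PySem.List.pyRange_one_cons hlt, List.foldl_cons]
    by_cases hlen : lo < (s.length : Int)
    · rw [if_pos hlen, PySem.List.pyGet?_eq_some_getElem s hlo hlen]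
      rw [ih (lo + 1) (by omega) (by omega) (acc ++ [s[lo.toNat]])]
      have h1 : (lo + 1).toNat = lo.toNat + 1 := by omega
      have h2 : (hi - lo).toNat = (hi - (lo + 1)).toNat + 1 := by omega
      have hix : lo.toNat < s.length := by omega
      rw [h1, h2, List.drop_eq_getElem_cons hix, List.take_succ_cons, List.append_assoc]
      simp
    · rw [if_neg hlen]
      rw [ih (lo + 1) (by omega) (by omega) acc]
      have d1 : s.drop lo.toNat = [] := List.drop_eq_nil_of_le (by omega)
      have d2 : s.drop (lo + 1).toNat = [] := List.drop_eq_nil_of_le (by omega)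
      rw [d1, d2]
      simp

-- one row of A equals one (possibly empty) clipped slice
lemma pv_rowA_eq_slice (s : List Char) (base cs ce : Int) (hb : 0 ≤ base) (hcs : 0 ≤ cs)
    (acc : List Char) :
    (PySem.List.pyRange cs (ce + 1) 1).foldl (fun acc2 c =>
        if base + c < (s.length : Int) then
          match PySem.List.pyGet? s (base + c) with
          | some ch => acc2 ++ [ch]
          | none => acc2
        else acc2) acc
    = acc ++ (if cs ≤ ce then PySem.List.slice s (some (base + cs)) (some (base + ce + 1)) else []) := by
  rw [pv_fold_shift (f := fun acc2 p =>
        if p < (s.length : Int) then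
          match PySem.List.pyGet? s p with
          | some ch => acc2 ++ [ch]
          | none => acc2
        else acc2) base cs (ce + 1) acc]
  rw [pv_row_fold s (base + (ce + 1)) ((base + (ce + 1)) - (base + cs)).toNat (base + cs) rfl (by omega) acc]
  by_cases h : cs ≤ ce
  · rw [if_pos h, PySem.List.slice_toNat s (by omega) (by omega)]
    have : (base + (ce + 1) - (base + cs)).toNat = (base + ce + 1).toNat - (base + cs).toNat := by omega
    rw [this]
  · rw [if_neg h]
    have : (base + (ce + 1) - (base + cs)).toNat = 0 := by omega
    rw [this]
    simp

-- string-level wrapper of pv_rowA_eq_slice, matching A's inner loop verbatim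
lemma pv_rowA_eq_slice_str (buf : String) (base cs ce : Int) (hb : 0 ≤ base) (hcs : 0 ≤ cs)
    (acc : List Char) :
    (PySem.List.pyRange cs (ce + 1) 1).foldl (fun acc2 c =>
        if base + c < (PySem.Str.len buf : Int) then
          match PySem.Str.pyGet? buf (base + c) with
          | some ch => acc2 ++ [ch]
          | none => acc2
        else acc2) acc
    = acc ++ (if cs ≤ ce then PySem.List.slice buf.toList (some (base + cs)) (some (base + ce + 1)) else []) := by
  have hlen : (PySem.Str.len buf : Int) = (buf.toList.length : Int) := by simp
  have hget : ∀ i, PySem.Str.pyGet? buf i = PySem.List.pyGet? buf.toList i := by intro i; simp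
  simp only [hlen, hget]
  exact pv_rowA_eq_slice buf.toList base cs ce hb hcs acc

-- A's whole loop nest, flattened: one clipped segment per row
lemma pv_A_flat (buf : String) (sr sc er ec cols : Int) (h0r : 0 ≤ sr) (h0c : 0 ≤ sc)
    (h0k : 0 ≤ cols) :
    (PySem.List.pyRange sr (er + 1) 1).foldl (fun content r =>
      (PySem.List.pyRange (if r = sr then sc else 0)
          ((if r = er then ec else cols - 1) + 1) 1).foldl (fun content c =>
        if r * cols + c < (PySem.Str.len buf : Int) then
          match PySem.Str.pyGet? buf (r * cols + c) with
          | some ch => content ++ [ch]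
          | none => content
        else content) content) []
    = (PySem.List.pyRange sr (er + 1) 1).flatMap (fun r =>
        if (if r = sr then sc else 0) ≤ (if r = er then ec else cols - 1) then
          PySem.List.slice buf.toList (some (r * cols + (if r = sr then sc else 0)))
            (some (r * cols + (if r = er then ec else cols - 1) + 1))
        else []) := by
  refine (PySem.List.foldl_congr_mem _ _ (fun content r => content ++
      (if (if r = sr then sc else 0) ≤ (if r = er then ec else cols - 1) then
        PySem.List.slice buf.toList (some (r * cols + (if r = sr then sc else 0)))
          (some (r * cols + (if r = er then ec else cols - 1) + 1))
      else [])) [] ?_).trans ?_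
  · intro acc r hr
    obtain ⟨h1, _⟩ := (PySem.List.mem_pyRange_one).1 hr
    exact pv_rowA_eq_slice_str buf (r * cols) _ _ (mul_nonneg (by omega) h0k)
      (by split_ifs <;> omega) acc
  · rw [PySem.List.foldl_append_eq_flatMap]
    simp

-- B's loop, flattened: zero or one slice per row
lemma pv_B_flat (buf : String) (sr sc er ec cols : Int) :
    (PySem.List.pyRange sr (er + 1) 1).foldl (fun parts r =>
      if (if r = sr then sc else 0) ≤ (if r = er then ec else cols - 1) then
        parts ++ [PySem.Str.slice buf
          (some (r * cols + (if r = sr then sc else 0)))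
          (some (r * cols + (if r = er then ec else cols - 1) + 1))]
      else parts) []
    = (PySem.List.pyRange sr (er + 1) 1).flatMap (fun r =>
        if (if r = sr then sc else 0) ≤ (if r = er then ec else cols - 1) then
          [PySem.Str.slice buf (some (r * cols + (if r = sr then sc else 0)))
            (some (r * cols + (if r = er then ec else cols - 1) + 1))]
        else []) := by
  refine (PySem.List.foldl_congr_mem _ _ (fun parts r => parts ++
      (if (if r = sr then sc else 0) ≤ (if r = er then ec else cols - 1) then
        [PySem.Str.slice buf (some (r * cols + (if r = sr then sc else 0)))
          (some (r * cols + (if r = er then ec else cols - 1) + 1))]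
      else [])) [] ?_).trans ?_
  · intro acc r hr
    by_cases hP : ((if r = sr then sc else 0) ≤ (if r = er then ec else cols - 1)) <;> simp [hP]
  · rw [PySem.List.foldl_append_eq_flatMap]
    simp

-- ===== VERDICT (by name: the statement is the Claim_ definition above) =====
theorem extract_field_content_py_spec : Claim_equal_extract_field_content_py := by
  unfold Claim_equal_extract_field_content_py
  intro buf sr sc er ec cols _ hpre
  unfold Spec_extract_field_content_py extract_field_content_py extract_field_content_py_alt
  rcases hpre with hlt | ⟨h0r, h0c, h0k⟩
  · rw [PySem.List.pyRange_one_eq_nil (show er + 1 ≤ sr by omega)]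
    apply String.toList_inj.mp
    simp [PySem.Str.join, PySem.Chars.join_nil]
  · rw [pv_A_flat buf sr sc er ec cols h0r h0c h0k, pv_B_flat buf sr sc er ec cols]
    apply String.toList_inj.mp
    simp only [PySem.Str.join]
    congr 3
    rw [show (String.toList "") = ([] : List Char) from rfl, pv_join_nil_flatten,
        List.map_flatMap, pv_flatten_flatMap]
    congr 1
    funext r
    split_ifs <;> simp [PySem.Str.slice]
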